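-- pv_equiv track=rewrite | github.com/aaronstarky/leetcode_solutions | lc795_NumberofContiguousSubarrays.py | count
-- ===== SOURCE A (Python) =====
-- def count(l, bound):
--     c = 0
--     answer = 0
--
--     for i in range(len(l)):
--         if l[i] <= bound:
--             c += 1
--         else:
--             answer += c*(c + 1)//2
--             c = 0
--     return answer + c*(c + 1)//2
-- ===== SOURCE B (Python) =====
-- def count(l, bound):
--     # Stage 1: positions of the "break" elements (those exceeding bound).
--     breaks = [k for k, x in enumerate(l) if x > bound]
--     # Stage 2: each maximal gap between consecutive breaks contributes g*(g+1)//2.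
--     answer = 0
--     prev = -1
--     for k in breaks:
--         g = k - prev - 1
--         answer += g * (g + 1) // 2
--         prev = k
--     g = len(l) - prev - 1
--     return answer + g * (g + 1) // 2
-- ===== Notes on version B (the rewrite author's own statement) =====
-- stated objective: alternative
-- what changed: Instead of A's single pass maintaining a running run-length counter that is flushed at each break, B first materializes the list of break positions (indices of elements > bound) and then iterates over that index list, deriving each gap length from the difference of consecutive break positions and summing the closed-form contributions.
import Mathlib
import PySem

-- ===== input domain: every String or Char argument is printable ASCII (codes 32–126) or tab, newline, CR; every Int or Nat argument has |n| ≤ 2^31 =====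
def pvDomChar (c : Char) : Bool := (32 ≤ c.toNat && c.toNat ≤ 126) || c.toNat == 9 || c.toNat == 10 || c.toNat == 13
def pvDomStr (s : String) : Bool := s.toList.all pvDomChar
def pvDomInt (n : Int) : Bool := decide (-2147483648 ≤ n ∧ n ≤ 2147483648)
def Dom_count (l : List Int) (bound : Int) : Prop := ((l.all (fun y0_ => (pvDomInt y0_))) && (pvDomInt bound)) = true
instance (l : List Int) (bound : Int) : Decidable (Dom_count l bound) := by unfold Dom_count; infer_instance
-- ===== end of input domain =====

-- B replaces A's one-pass run-length counter by a staged algorithm: first collect the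
-- break positions (indices of elements > bound), then sum the triangular contribution
-- of each gap between consecutive breaks; same O(n) cost, a different decomposition.

-- ===== PORT A =====
-- 'for i in range(len(l)): … l[i] …' — i is always in range, so pyGetD's default 0 is never used
def count (l : List Int) (bound : Int) : Int :=
  let s := (PySem.List.pyRange 0 (l.length : Int) 1).foldl
    (fun (st : Int × Int) i =>
      if PySem.List.pyGetD l i 0 ≤ bound then (st.1 + 1, st.2)
      else (0, st.2 + PySem.Int.floordiv (st.1 * (st.1 + 1)) 2)) (0, 0)
  s.2 + PySem.Int.floordiv (s.1 * (s.1 + 1)) 2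

-- ===== PORT B =====
-- '[k for k, x in enumerate(l) if x > bound]' → filter + map over PySem.List.enumerate
def count_alt (l : List Int) (bound : Int) : Int :=
  let breaks := ((PySem.List.enumerate l).filter (fun p => decide (bound < p.2))).map (fun p => p.1)
  let s := breaks.foldl
    (fun (st : Int × Int) k =>
      (k, st.2 + PySem.Int.floordiv ((k - st.1 - 1) * ((k - st.1 - 1) + 1)) 2)) (-1, 0)
  let g := (l.length : Int) - s.1 - 1
  s.2 + PySem.Int.floordiv (g * (g + 1)) 2

-- ===== PRECONDITION & SPEC =====
def Spec_count (l : List Int) (bound : Int) (out : Int) : Prop := out = count_alt l bound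
instance (l : List Int) (bound : Int) (out : Int) : Decidable (Spec_count l bound out) := by unfold Spec_count; infer_instance

-- ===== CLAIM =====
def Claim_equal_count : Prop := ∀ (l : List Int) (bound : Int), Dom_count l bound → Spec_count l bound (count l bound)

-- ===== LEMMAS AND PROOFS =====

-- triangular contribution of a run of length c
def pvTri (c : Int) : Int := PySem.Int.floordiv (c * (c + 1)) 2

-- common reference function: answer of the remaining list given current run length c
def pvG (bound : Int) : List Int → Int → Int
  | [], c => pvTri c
  | x :: xs, c => if x ≤ bound then pvG bound xs (c + 1) else pvTri c + pvG bound xs 0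

-- A's fold equals pvG (accumulator invariant)
theorem pv_A_inv (bound : Int) : ∀ (l : List Int) (c a : Int),
    (let s := l.foldl
      (fun (st : Int × Int) x =>
        if x ≤ bound then (st.1 + 1, st.2)
        else (0, st.2 + PySem.Int.floordiv (st.1 * (st.1 + 1)) 2)) (c, a)
     s.2 + PySem.Int.floordiv (s.1 * (s.1 + 1)) 2) = a + pvG bound l c := by
  intro l
  induction l with
  | nil => intro c a; simp [pvG, pvTri]
  | cons x xs ih =>
    intro c a
    simp only [List.foldl_cons, pvG]
    by_cases hx : x ≤ bound
    · simpa [hx] using ih (c + 1) a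
    · simpa [hx, pvTri, add_assoc] using ih 0 (a + pvTri c)

-- B's staged computation equals pvG (invariant: run length so far = s - prev - 1)
theorem pv_B_inv (bound : Int) : ∀ (l : List Int) (s prev ans : Int),
    (let st := (((PySem.List.enumerate l s).filter (fun p => decide (bound < p.2))).map
        (fun p => p.1)).foldl
      (fun (st : Int × Int) k =>
        (k, st.2 + PySem.Int.floordiv ((k - st.1 - 1) * ((k - st.1 - 1) + 1)) 2)) (prev, ans)
     st.2 + PySem.Int.floordiv (((s + (l.length : Int)) - st.1 - 1) *
        (((s + (l.length : Int)) - st.1 - 1) + 1)) 2)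
    = ans + pvG bound l (s - prev - 1) := by
  intro l
  induction l with
  | nil => intro s prev ans; simp [PySem.List.enumerate_nil, pvG, pvTri]
  | cons x xs ih =>
    intro s prev ans
    rw [PySem.List.enumerate_cons]
    by_cases hx : x ≤ bound
    · have hx' : ¬ bound < x := not_lt.mpr hx
      have := ih (s + 1) prev ans
      simp only [List.filter_cons, hx', decide_false] at *
      simp only [pvG, if_pos hx]
      rw [show s - prev - 1 + 1 = s + 1 - prev - 1 by ring, ← this]
      simp only [List.length_cons]
      norm_num
      ring_nf
    · have hx' : bound < x := lt_of_not_ge hx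
      have := ih (s + 1) s (ans + pvTri (s - prev - 1))
      simp only [List.filter_cons, hx', decide_true, if_true] at *
      simp only [pvG, if_neg hx, List.map_cons, List.foldl_cons]
      rw [show s + 1 - s - 1 = (0 : Int) by ring] at this
      simp only [pvTri] at this ⊢
      rw [show (s + (((x :: xs).length : Nat) : Int)) = (s + 1) + ((xs.length : Nat) : Int) by
        simp [List.length_cons]; ring]
      rw [this]
      ring

theorem pv_count_eq (l : List Int) (bound : Int) : count l bound = count_alt l bound := by
  unfold count count_alt
  rw [PySem.List.foldl_pyRange_zero_pyGetD' l 0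
      (fun (st : Int × Int) x =>
        if x ≤ bound then (st.1 + 1, st.2)
        else (0, st.2 + PySem.Int.floordiv (st.1 * (st.1 + 1)) 2)) (0, 0)]
  have hA := pv_A_inv bound l 0 0
  have hB := pv_B_inv bound l 0 (-1) 0
  simp only [zero_add] at hA hB
  rw [show (0 : Int) - (-1) - 1 = 0 by ring] at hB
  simp only at hA hB ⊢
  rw [hA, ← hB]

-- ===== VERDICT =====
theorem count_spec : Claim_equal_count := by
  intro l bound _
  exact pv_count_eq l bound
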